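-- pv_equiv track=rewrite | github.com/anusha1205/cn | Cn Python Codes/checksum.py | bin_sum
-- ===== SOURCE A (Python) =====
-- def bin_sum(chunk1, chunk2, div):
--     sum_val = int(chunk1, 2) + int(chunk2, 2)
--     st = bin(sum_val)[2:]
--
--     if len(st) == div + 1:
--         carry = "1"
--         st1 = st[1:]
--         st = bin_sum(st1, carry, div)
--         return st
--     else:
--         return st.zfill(div)
-- ===== SOURCE B (Python) =====
-- def bin_sum(chunk1, chunk2, div):
--     sum_val = int(chunk1, 2) + int(chunk2, 2)
--     st = bin(sum_val)[2:]
--     while len(st) == div + 1: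
--         sum_val = int(st[1:], 2) + 1
--         st = bin(sum_val)[2:]
--     return st.zfill(div)
-- ===== Notes on version B (the rewrite author's own statement) =====
-- stated objective: simpler
-- what changed: The tail-recursive carry-wrap (bin_sum calling itself with the overflow bit re-added as a carry string) is replaced by an explicit while loop that maintains (sum_val, st) iteratively and zfills once at the end.
import Mathlib
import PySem

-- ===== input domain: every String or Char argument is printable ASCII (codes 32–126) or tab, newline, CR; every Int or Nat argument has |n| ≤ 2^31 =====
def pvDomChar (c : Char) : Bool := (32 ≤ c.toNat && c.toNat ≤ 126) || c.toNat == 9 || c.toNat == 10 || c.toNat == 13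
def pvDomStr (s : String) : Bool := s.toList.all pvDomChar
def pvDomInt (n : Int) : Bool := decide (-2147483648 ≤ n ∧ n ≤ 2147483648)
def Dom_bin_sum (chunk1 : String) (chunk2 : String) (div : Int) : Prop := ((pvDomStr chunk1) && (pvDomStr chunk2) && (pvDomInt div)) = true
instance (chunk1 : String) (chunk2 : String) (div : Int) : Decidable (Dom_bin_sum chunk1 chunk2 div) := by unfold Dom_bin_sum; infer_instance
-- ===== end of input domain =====

-- B replaces A's tail recursion by an explicit while loop over (sum_val, st); same values, simpler control flow.

-- ===== PORT A =====
-- A's recursion is not structural on its String arguments, so the port carries a fuel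
-- counter that only makes the same computation total; bin_sum supplies enough fuel for
-- every input Pre_ admits (each carry-wrap step strictly decreases the sum), so the
-- fuel-exhaustion branch is never reached there.  Where Python's int(·, 2) raises
-- ValueError (ofStrBase? = none) the port returns "" — those inputs are outside Pre_.
def binSumFuelA : Nat → String → String → Int → String
  | 0, _, _, _ => ""
  | f + 1, chunk1, chunk2, div =>
    match PySem.Int.ofStrBase? chunk1 2, PySem.Int.ofStrBase? chunk2 2 with
    | some v1, some v2 =>
      let sum_val := v1 + v2                                      -- sum_val = int(chunk1,2) + int(chunk2,2)
      let st := PySem.Str.slice (PySem.Int.pyBin sum_val) (some 2) none   -- st = bin(sum_val)[2:]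
      if PySem.Str.len st = div + 1 then
        binSumFuelA f (PySem.Str.slice st (some 1) none) "1" div  -- st = bin_sum(st[1:], "1", div)
      else
        PySem.Str.zfill st div                                    -- st.zfill(div)
    | _, _ => ""                                                  -- ValueError (outside Pre_)

def bin_sum (chunk1 : String) (chunk2 : String) (div : Int) : String :=
  let fuel := match PySem.Int.ofStrBase? chunk1 2, PySem.Int.ofStrBase? chunk2 2 with
    | some v1, some v2 => (v1 + v2).natAbs + 3
    | _, _ => 1
  binSumFuelA fuel chunk1 chunk2 div

-- ===== PORT B =====
-- the while loop of Source B, with the same totalising fuel counter; state is st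
def binSumLoopB : Nat → String → Int → String
  | 0, _, _ => ""
  | f + 1, st, div =>
    if PySem.Str.len st = div + 1 then                             -- while len(st) == div + 1:
      match PySem.Int.ofStrBase? (PySem.Str.slice st (some 1) none) 2 with
      | some v =>                                                  --   sum_val = int(st[1:], 2) + 1
        binSumLoopB f (PySem.Str.slice (PySem.Int.pyBin (v + 1)) (some 2) none) div  -- st = bin(sum_val)[2:]
      | none => ""                                                 -- ValueError (outside Pre_)
    else
      PySem.Str.zfill st div                                       -- return st.zfill(div)

def bin_sum_alt (chunk1 : String) (chunk2 : String) (div : Int) : String :=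
  match PySem.Int.ofStrBase? chunk1 2, PySem.Int.ofStrBase? chunk2 2 with
  | some v1, some v2 =>
    let sum_val := v1 + v2
    binSumLoopB (sum_val.natAbs + 3) (PySem.Str.slice (PySem.Int.pyBin sum_val) (some 2) none) div
  | _, _ => ""

-- ===== PRECONDITION & SPEC =====
-- Pre_ excludes exactly the inputs on which Python A raises ValueError: a chunk that is
-- not a valid base-2 int literal, or div = 0 with 0 ≤ int(chunk1,2)+int(chunk2,2) ≤ 1
-- (there the recursion reaches int('', 2)).
def Pre_bin_sum (chunk1 : String) (chunk2 : String) (div : Int) : Prop :=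
  (PySem.Int.ofStrBase? chunk1 2).isSome ∧ (PySem.Int.ofStrBase? chunk2 2).isSome ∧
    ¬ (div = 0 ∧ 0 ≤ (PySem.Int.ofStrBase? chunk1 2).getD 0 + (PySem.Int.ofStrBase? chunk2 2).getD 0 ∧
         (PySem.Int.ofStrBase? chunk1 2).getD 0 + (PySem.Int.ofStrBase? chunk2 2).getD 0 ≤ 1)
instance (chunk1 : String) (chunk2 : String) (div : Int) : Decidable (Pre_bin_sum chunk1 chunk2 div) := by
  unfold Pre_bin_sum; infer_instance

def pvWitness_bin_sum : String × String × Int := ("101", "011", 3)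

def Spec_bin_sum (chunk1 : String) (chunk2 : String) (div : Int) (out : String) : Prop := out = bin_sum_alt chunk1 chunk2 div
instance (chunk1 : String) (chunk2 : String) (div : Int) (out : String) : Decidable (Spec_bin_sum chunk1 chunk2 div out) := by unfold Spec_bin_sum; infer_instance

-- ===== CLAIM (what is proved, stated in full; the proofs are below) =====
def Claim_equal_bin_sum : Prop := ∀ (chunk1 : String) (chunk2 : String) (div : Int), Dom_bin_sum chunk1 chunk2 div → Pre_bin_sum chunk1 chunk2 div → Spec_bin_sum chunk1 chunk2 div (bin_sum chunk1 chunk2 div)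

-- ===== LEMMAS AND PROOFS =====

theorem ofStrBase?_one : PySem.Int.ofStrBase? "1" 2 = some 1 := by decide

-- with equal fuel, A's recursion and B's loop compute the same string
theorem fuelA_eq_loopB (f : Nat) : ∀ (c1 c2 : String) (div v1 v2 : Int),
    PySem.Int.ofStrBase? c1 2 = some v1 → PySem.Int.ofStrBase? c2 2 = some v2 →
    binSumFuelA (f + 1) c1 c2 div
      = binSumLoopB (f + 1) (PySem.Str.slice (PySem.Int.pyBin (v1 + v2)) (some 2) none) div := by
  induction f with
  | zero =>
    intro c1 c2 div v1 v2 h1 h2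
    rw [binSumFuelA, binSumLoopB]
    simp only [h1, h2]
    split
    · rw [binSumFuelA]
      split <;> rfl
    · rfl
  | succ f ih =>
    intro c1 c2 div v1 v2 h1 h2
    rw [binSumFuelA, binSumLoopB]
    simp only [h1, h2]
    split
    · -- carry-wrap step
      rcases hst : PySem.Int.ofStrBase?
          (PySem.Str.slice (PySem.Str.slice (PySem.Int.pyBin (v1 + v2)) (some 2) none) (some 1) none) 2 with _ | v
      · -- inner int() fails: both sides hit the sentinel on the next step
        rw [binSumFuelA]
        simp only [hst]
      · rw [ih _ _ div v 1 hst ofStrBase?_one]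
    · rfl

theorem bin_sum_eq_alt (c1 c2 : String) (div : Int) : bin_sum c1 c2 div = bin_sum_alt c1 c2 div := by
  unfold bin_sum bin_sum_alt
  rcases h1 : PySem.Int.ofStrBase? c1 2 with _ | v1
  · rw [binSumFuelA]; simp only [h1]
  · rcases h2 : PySem.Int.ofStrBase? c2 2 with _ | v2
    · rw [binSumFuelA]; simp only [h1, h2]
    · simp only [h1, h2]
      exact fuelA_eq_loopB ((v1 + v2).natAbs + 2) c1 c2 div v1 v2 h1 h2

-- ===== VERDICT (by name: the statement is the Claim_ definition above) =====
theorem bin_sum_spec : Claim_equal_bin_sum := by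
  intro c1 c2 div _ _
  unfold Spec_bin_sum
  exact bin_sum_eq_alt c1 c2 div
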